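-- pv_equiv track=rewrite | github.com/themaigod/WSI-with-Gaze-Processing | slidelabel_regular.py | repeat_add
-- ===== SOURCE A (Python) =====
-- def repeat_add(name_list, point_list, level_list, path_list, image_label):
--     check_list = []
--     location_list = []
--     u = 0
--     for o in range(len(name_list)):
--         o = o - u
--         if path_list[o] not in check_list:
--             check_list.append(path_list[o])
--             location_list.append([path_list[o], o])
--         else:
--             index = check_list.index(path_list[o])
--             location = location_list[index][1]
--             point_list[location] = point_list[location] + point_list[o]
--             level_list[location] = level_list[location] + level_list[o]
--             name_list.pop(o)
--             point_list.pop(o)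
--             level_list.pop(o)
--             path_list.pop(o)
--             image_label.pop(o)
--             u = u + 1
--     return name_list, point_list, level_list, path_list, image_label
-- ===== SOURCE B (Python) =====
-- def repeat_add(name_list, point_list, level_list, path_list, image_label):
--     first = {}   # path -> index of its first occurrence
--     dups = set() # indices of duplicate occurrences
--     for i in range(len(name_list)):
--         p = path_list[i]
--         j = first.get(p)
--         if j is None:
--             first[p] = i
--         else:
--             dups.add(i)
--             point_list[j] += point_list[i]
--             level_list[j] += level_list[i]
--     for lst in (name_list, point_list, level_list, path_list, image_label):
--         lst[:] = [x for k, x in enumerate(lst) if k not in dups]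
--     return name_list, point_list, level_list, path_list, image_label
-- ===== Notes on version B (the rewrite author's own statement) =====
-- stated objective: faster
-- what changed: replaced the quadratic scan (list membership test + list.index + in-place pops with a shifting index) by a single O(n) pass recording first-occurrence indices in a dict and duplicate indices in a set, summing into the first occurrence, then filtering the duplicate positions out of all five lists in place.
import Mathlib
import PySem

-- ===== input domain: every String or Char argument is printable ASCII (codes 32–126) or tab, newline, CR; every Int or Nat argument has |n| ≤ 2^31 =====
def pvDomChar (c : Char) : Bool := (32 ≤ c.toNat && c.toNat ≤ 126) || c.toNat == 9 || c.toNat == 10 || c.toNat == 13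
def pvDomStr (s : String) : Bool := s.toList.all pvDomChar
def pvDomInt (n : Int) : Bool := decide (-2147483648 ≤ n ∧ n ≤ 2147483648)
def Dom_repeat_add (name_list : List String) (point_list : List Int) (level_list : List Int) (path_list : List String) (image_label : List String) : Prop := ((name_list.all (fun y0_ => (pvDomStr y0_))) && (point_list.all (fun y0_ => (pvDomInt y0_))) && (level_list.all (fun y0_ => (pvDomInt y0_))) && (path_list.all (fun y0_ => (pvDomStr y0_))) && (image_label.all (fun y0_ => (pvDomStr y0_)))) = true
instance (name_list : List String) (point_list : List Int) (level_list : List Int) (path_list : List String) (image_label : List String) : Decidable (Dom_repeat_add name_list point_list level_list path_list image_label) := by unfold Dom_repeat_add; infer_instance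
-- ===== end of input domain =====

-- B replaces A's quadratic membership/index/pop scan by one dict-indexed pass (asymptotically faster);
-- equivalence is about the RETURN value (A dedups its argument lists in place; Python B mirrors that
-- side effect by writing the results back, which the pure port does not model).

-- ===== PORT A =====
structure AState where
  nm : List String
  pt : List Int
  lv : List Int
  ph : List String
  lb : List String
  chk : List String
  loc : List (String × Int)
  u : Int
deriving Repr, DecidableEq

-- xs.pop(i) used for its mutation only: the list after the pop (Python raises out of range; Pre_ excludes that)
def popA {α : Type} (xs : List α) (i : Int) : List α := ((PySem.List.pop? xs i).map (·.2)).getD xs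

def aStep (st : AState) (o : Int) : AState :=
  let o := o - st.u
  let p := PySem.List.pyGetD st.ph o ""
  if st.chk.contains p = false then
    { st with chk := st.chk ++ [p], loc := st.loc ++ [(p, o)] }
  else
    let index : Nat := (PySem.List.index? st.chk p).getD 0
    let location := (PySem.List.pyGetD st.loc (index : Int) ("", 0)).2
    let pt := PySem.List.pySetD st.pt location (PySem.List.pyGetD st.pt location 0 + PySem.List.pyGetD st.pt o 0)
    let lv := PySem.List.pySetD st.lv location (PySem.List.pyGetD st.lv location 0 + PySem.List.pyGetD st.lv o 0)
    { nm := popA st.nm o, pt := popA pt o, lv := popA lv o, ph := popA st.ph o,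
      lb := popA st.lb o, chk := st.chk, loc := st.loc, u := st.u + 1 }

def repeat_add (name_list : List String) (point_list : List Int) (level_list : List Int) (path_list : List String) (image_label : List String) : List String × List Int × List Int × List String × List String :=
  let n := name_list.length
  let st := (PySem.List.pyRange 0 (n : Int) 1).foldl aStep
    ⟨name_list, point_list, level_list, path_list, image_label, [], [], 0⟩
  (st.nm, st.pt, st.lv, st.ph, st.lb)

-- ===== PORT B =====
structure BState where
  first : PySem.Dict String Int
  dups : PySem.Set Int
  pt : List Int
  lv : List Int

def bStep (path_list : List String) (st : BState) (o : Int) : BState :=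
  let p := PySem.List.pyGetD path_list o ""
  match st.first.get? p with
  | none => { st with first := st.first.insert p o }
  | some j =>
      { st with dups := PySem.Set.add st.dups o,
                pt := PySem.List.pySetD st.pt j (PySem.List.pyGetD st.pt j 0 + PySem.List.pyGetD st.pt o 0),
                lv := PySem.List.pySetD st.lv j (PySem.List.pyGetD st.lv j 0 + PySem.List.pyGetD st.lv o 0) }

-- [x for k, x in enumerate(lst) if k not in dups]
def dropDup {α : Type} (dups : PySem.Set Int) (xs : List α) : List α :=
  ((PySem.List.enumerate xs 0).filter (fun q => !(dups.contains q.1))).map (·.2)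

def repeat_add_alt (name_list : List String) (point_list : List Int) (level_list : List Int) (path_list : List String) (image_label : List String) : List String × List Int × List Int × List String × List String :=
  let st := (PySem.List.pyRange 0 (name_list.length : Int) 1).foldl (bStep path_list)
    ⟨PySem.Dict.empty, PySem.Set.ofList [], point_list, level_list⟩
  (dropDup st.dups name_list, dropDup st.dups st.pt, dropDup st.dups st.lv,
   dropDup st.dups path_list, dropDup st.dups image_label)

-- ===== PRECONDITION & SPEC =====
-- Pre_ is exactly the inputs on which A returns: it reads path_list[i] for every i < len(name_list),
-- and at each duplicated path (and only there) it indexes/pops point_list, level_list and image_label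
-- at positions up to that i; anywhere else it raises IndexError.
def Pre_repeat_add (name_list : List String) (point_list : List Int) (level_list : List Int) (path_list : List String) (image_label : List String) : Prop :=
  name_list.length ≤ path_list.length ∧
  ∀ k : Nat, k < name_list.length → path_list.getD k "" ∈ path_list.take k →
    (k < point_list.length ∧ k < level_list.length ∧ k < image_label.length)
instance (name_list : List String) (point_list : List Int) (level_list : List Int) (path_list : List String) (image_label : List String) : Decidable (Pre_repeat_add name_list point_list level_list path_list image_label) := by unfold Pre_repeat_add; infer_instance

def pvWitness_repeat_add : List String × List Int × List Int × List String × List String :=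
  (["a", "b", "c"], [1, 2, 3], [4, 5, 6], ["p", "q", "p"], ["x", "y", "z"])

def Spec_repeat_add (name_list : List String) (point_list : List Int) (level_list : List Int) (path_list : List String) (image_label : List String) (out : List String × List Int × List Int × List String × List String) : Prop := out = repeat_add_alt name_list point_list level_list path_list image_label
instance (name_list : List String) (point_list : List Int) (level_list : List Int) (path_list : List String) (image_label : List String) (out : List String × List Int × List Int × List String × List String) : Decidable (Spec_repeat_add name_list point_list level_list path_list image_label out) := by unfold Spec_repeat_add; infer_instance

-- ===== CLAIM (what is proved, stated in full; the proofs are below) =====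
def Claim_equal_repeat_add : Prop := ∀ (name_list : List String) (point_list : List Int) (level_list : List Int) (path_list : List String) (image_label : List String), Dom_repeat_add name_list point_list level_list path_list image_label → Pre_repeat_add name_list point_list level_list path_list image_label → Spec_repeat_add name_list point_list level_list path_list image_label (repeat_add name_list point_list level_list path_list image_label)

-- ===== LEMMAS AND PROOFS =====

-- k is a duplicate position of ph: ph[k] already occurred before k
def dupB (ph : List String) (k : Nat) : Bool := (ph.take k).contains (ph.getD k "")

def keepB (ph : List String) (k : Nat) : Bool := !(dupB ph k)

-- duplicate positions below i, as the Int set B accumulates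
def dupL (ph : List String) (i : Nat) : List Int := ((List.range i).filter (dupB ph)).map (fun k => (k : Int))

-- kept (first-occurrence) positions below i
def kron (ph : List String) (i : Nat) : List Nat := (List.range i).filter (keepB ph)

def kcnt (ph : List String) (i : Nat) : Nat := (kron ph i).length

-- A's check_list / location_list after i iterations
def chkS (ph : List String) (i : Nat) : List String := (kron ph i).map (fun k => ph.getD k "")

def locS (ph : List String) (i : Nat) : List (String × Int) := (chkS ph i).zipIdx.map (fun x => (x.1, (x.2 : Int)))

theorem getD_append_mid {a : Type} (l1 l2 : List a) (x d : a) : (l1 ++ x :: l2).getD l1.length d = x := by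
  simp [List.getD]

theorem getD_append_mid' {a : Type} (l1 l2 : List a) (x d : a) (n : Nat) (h : n = l1.length) :
    (l1 ++ x :: l2).getD n d = x := by subst h; exact getD_append_mid l1 l2 x d

theorem set_append_mid {a : Type} (l1 l2 : List a) (x v : a) (n : Nat) (h : n = l1.length) :
    (l1 ++ x :: l2).set n v = l1 ++ v :: l2 := by
  subst h
  rw [List.set_append_right _ _ (Nat.le_refl _)]
  simp

theorem eraseIdx_append_mid {a : Type} (l1 l2 : List a) (x : a) (n : Nat) (h : n = l1.length) :
    (l1 ++ x :: l2).eraseIdx n = l1 ++ l2 := by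
  subst h
  simp [List.eraseIdx_append_of_length_le (Nat.le_refl _)]

theorem index?_append_singleton {a : Type} [BEq a] [LawfulBEq a] (l : List a) (c v : a) (h : v ≠ c) :
    PySem.List.index? (l ++ [c]) v = PySem.List.index? l v := by
  by_cases hv : v ∈ l
  · exact PySem.List.index?_append_of_mem _ hv
  · have h1 : PySem.List.index? l v = none := (PySem.List.index?_eq_none_iff _ _).mpr hv
    have h2 : PySem.List.index? (l ++ [c]) v = none := by
      refine (PySem.List.index?_eq_none_iff _ _).mpr ?_
      simp [hv, h]
    rw [h1, h2]

theorem index?_append_mid {a : Type} [BEq a] [LawfulBEq a] (l1 l2 : List a) (v : a) (h : v ∉ l1) :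
    PySem.List.index? (l1 ++ v :: l2) v = some l1.length :=
  (PySem.List.index?_eq_some_iff _ _ _).mpr ⟨l1, l2, rfl, rfl, h⟩

theorem contains_dupL (ph : List String) (i j : Nat) :
    (dupL ph i).contains ((j : Nat) : Int) = (decide (j < i) && dupB ph j) := by
  simp only [dupL]
  rw [List.contains_eq_any_beq]
  simp only [List.any_map]
  rw [List.any_eq]
  by_cases hj : j < i ∧ dupB ph j = true
  · have hex : ∃ x ∈ List.range i, (dupB ph x && ((j : Int) == (x : Int))) = true :=
      ⟨j, by simp [hj.1], by simp [hj.2]⟩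
    simp [hex, hj.1, hj.2]
  · have hex : ¬ ∃ x ∈ List.range i, (dupB ph x && ((j : Int) == (x : Int))) = true := by
      rintro ⟨a, ha, hx⟩
      rw [Bool.and_eq_true] at hx
      have : j = a := by exact_mod_cast (beq_iff_eq.mp hx.2)
      subst this
      exact hj ⟨List.mem_range.mp ha, hx.1⟩
    rcases Decidable.not_and_iff_not_or_not.mp hj with h | h <;> simp [hex, h]

theorem dropDup_rep {α : Type} (D : PySem.Set Int) (xs : List α) (d : α) :
    dropDup D xs
      = ((List.range xs.length).filter (fun j => !(D.contains ((j : Nat) : Int)))).map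
          (fun j => xs.getD j d) := by
  unfold dropDup
  rw [PySem.List.enumerate_eq_map_pyRange xs d]
  have hlen : PySem.List.len xs = ((xs.length : Nat) : Int) := by simp [PySem.List.len_eq]
  rw [hlen, PySem.List.pyRange_zero_natCast]
  simp [List.filter_map, List.map_map, Function.comp_def]

theorem range_filter_split (n k : Nat) (q : Nat → Bool) (hk : k < n) :
    (List.range n).filter q
      = (List.range k).filter q ++ ((if q k then [k] else []) ++ (List.range' (k+1) (n-k-1)).filter q) := by
  have h0 : ∀ m, List.range (k + m) = List.range k ++ List.range' k m := fun m => by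
    rw [List.range_eq_range', List.range_eq_range', ← List.range'_append]
    norm_num
  have h1 := h0 (n - k)
  rw [show k + (n - k) = n by omega] at h1
  have h2 : List.range' k (n - k) = k :: List.range' (k+1) (n-k-1) := by
    rw [show n - k = (n - k - 1) + 1 by omega, List.range'_succ]
    norm_num
  rw [h1, h2, List.filter_append, List.filter_cons]
  rcases h : q k <;> simp [h]

-- the workhorse: dropDup D xs around a kept position k
theorem dropDup_split {α : Type} (D : PySem.Set Int) (xs : List α) (d : α) (k : Nat)
    (hk : k < xs.length) (hq : D.contains ((k : Nat) : Int) = false) :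
    dropDup D xs
      = ((List.range k).filter (fun j => !(D.contains ((j : Nat) : Int)))).map (fun j => xs.getD j d)
        ++ xs.getD k d
        :: ((List.range' (k+1) (xs.length-k-1)).filter (fun j => !(D.contains ((j : Nat) : Int)))).map
             (fun j => xs.getD j d) := by
  rw [dropDup_rep D xs d]
  rw [range_filter_split xs.length k _ hk]
  simp only [hq, Bool.not_false, if_true, List.map_append, List.map_cons]
  simp

theorem map_getD_range {α : Type} (xs : List α) (d : α) :
    (List.range xs.length).map (fun j => xs.getD j d) = xs := by
  apply List.ext_getElem
  · simp
  · intro n h1 h2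
    simp [List.getD, List.getElem?_eq_getElem h2]

theorem dropDup_nil {α : Type} (xs : List α) : dropDup (PySem.Set.ofList []) xs = xs := by
  cases xs with
  | nil => rfl
  | cons x t =>
    rw [dropDup_rep _ _ x]
    have : ∀ j : Nat, ((PySem.Set.ofList [] : PySem.Set Int).contains ((j : Nat) : Int)) = false := by
      intro j; rfl
    simp only [this, Bool.not_false, List.filter_true]
    exact map_getD_range (x :: t) x

theorem dd_get {α : Type} (D : PySem.Set Int) (xs : List α) (d : α) (k : Nat)
    (hk : k < xs.length) (hq : D.contains ((k : Nat) : Int) = false) :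
    PySem.List.pyGetD (dropDup D xs)
      ((((List.range k).filter (fun j => !(D.contains ((j : Nat) : Int)))).length : Nat) : Int) d
      = xs.getD k d := by
  rw [dropDup_split D xs d k hk hq, PySem.List.pyGetD_natCast]
  exact getD_append_mid' _ _ _ _ _ (by simp)

theorem dd_set {α : Type} (D : PySem.Set Int) (xs : List α) (v : α) (k : Nat)
    (hk : k < xs.length) (hq : D.contains ((k : Nat) : Int) = false) :
    (dropDup D xs).set (((List.range k).filter (fun j => !(D.contains ((j : Nat) : Int)))).length) v
      = dropDup D (xs.set k v) := by
  rw [dropDup_split D xs v k hk hq, set_append_mid _ _ _ _ _ (by simp),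
      dropDup_split D (xs.set k v) v k (by simpa using hk) hq]
  have hmid : (xs.set k v).getD k v = v := by
    rw [List.getD_eq_getElem _ _ (by simpa using hk)]
    simp
  rw [hmid]
  have hL : List.map (fun j => (xs.set k v).getD j v)
        (List.filter (fun j => !(D.contains ((j : Nat) : Int))) (List.range k))
      = List.map (fun j => xs.getD j v)
        (List.filter (fun j => !(D.contains ((j : Nat) : Int))) (List.range k)) := by
    apply List.map_congr_left
    intro j hj
    have hjk : j < k := List.mem_range.mp (List.mem_filter.mp hj).1
    simp [List.getD, List.getElem?_set_ne, Nat.ne_of_lt' hjk]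
  have hR : List.map (fun j => (xs.set k v).getD j v)
        (List.filter (fun j => !(D.contains ((j : Nat) : Int)))
          (List.range' (k+1) ((xs.set k v).length - k - 1)))
      = List.map (fun j => xs.getD j v)
        (List.filter (fun j => !(D.contains ((j : Nat) : Int)))
          (List.range' (k+1) (xs.length - k - 1))) := by
    rw [List.length_set]
    apply List.map_congr_left
    intro j hj
    have hjk : k + 1 ≤ j := (List.mem_range'_1.mp (List.mem_filter.mp hj).1).1
    simp [List.getD, List.getElem?_set_ne, show k ≠ j by omega]
  rw [hL, hR]

theorem dd_pop {α : Type} (D : PySem.Set Int) (xs : List α) (k : Nat)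
    (hk : k < xs.length) (hq : D.contains ((k : Nat) : Int) = false) :
    popA (dropDup D xs)
      ((((List.range k).filter (fun j => !(D.contains ((j : Nat) : Int)))).length : Nat) : Int)
      = dropDup (D ++ [((k : Nat) : Int)]) xs := by
  cases xs with
  | nil => simp at hk
  | cons x t =>
    unfold popA
    have hc : (((List.range k).filter (fun j => !(D.contains ((j : Nat) : Int)))).length)
        < (dropDup D (x :: t)).length := by
      rw [dropDup_split D (x :: t) x k hk hq]
      simp
    rw [PySem.List.pop?_natCast _ _ hc]
    simp only [Option.map_some, Option.getD_some]
    rw [dropDup_split D (x :: t) x k hk hq]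
    rw [eraseIdx_append_mid _ _ _ _ (by simp)]
    rw [dropDup_rep (D ++ [((k : Nat) : Int)]) (x :: t) x]
    rw [range_filter_split (x :: t).length k _ hk]
    have hck : ((D ++ [((k : Nat) : Int)]).contains ((k : Nat) : Int)) = true := by simp
    simp only [hck, Bool.not_true, Bool.false_eq_true, if_false, List.nil_append, List.map_append]
    congr 1
    · congr 1
      apply List.filter_congr
      intro j hj
      have hjk : j < k := List.mem_range.mp hj
      have h1 : (((j : Nat) : Int) == ((k : Nat) : Int)) = false := by
        simp; omega
      simp [h1]
      intro _
      omega
    · congr 1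
      apply List.filter_congr
      intro j hj
      have hjk : k + 1 ≤ j := (List.mem_range'_1.mp hj).1
      have h1 : (((j : Nat) : Int) == ((k : Nat) : Int)) = false := by
        simp; omega
      simp [h1]
      intro _
      omega

theorem kfilter_eq (ph : List String) (i k : Nat) (hki : k ≤ i) :
    (List.range k).filter (fun j => !(PySem.Set.contains (dupL ph i) ((j : Nat) : Int))) = kron ph k := by
  apply List.filter_congr
  intro j hj
  have hjk : j < k := List.mem_range.mp hj
  show (!((dupL ph i).contains ((j : Nat) : Int))) = keepB ph j
  rw [contains_dupL]
  simp [keepB, show j < i by omega]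

theorem length_chkS (ph : List String) (i : Nat) : (chkS ph i).length = kcnt ph i := by
  simp [chkS, kcnt]

theorem getD_zipIdx_map (ph : List String) (k : Nat) (hk : k < ph.length) :
    PySem.List.pyGetD (ph.zipIdx.map (fun x => (x.1, (x.2 : Int)))) ((k : Nat) : Int) ("", 0)
      = (ph[k], (k : Int)) := by
  rw [PySem.List.pyGetD_natCast]
  rw [List.getD_eq_getElem _ _ (by simp [hk])]
  simp [List.getElem_zipIdx]

theorem zipIdx_map_append (ph : List String) (p : String) :
    (ph ++ [p]).zipIdx.map (fun x => (x.1, (x.2 : Int)))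
      = ph.zipIdx.map (fun x => (x.1, (x.2 : Int))) ++ [(p, (ph.length : Int))] := by
  simp [List.zipIdx_append]

theorem mem_chkS (ph : List String) (i : Nat) (hi : i ≤ ph.length) (p : String) :
    p ∈ chkS ph i ↔ p ∈ ph.take i := by
  constructor
  · intro hp
    obtain ⟨k, hk, hgd⟩ := List.mem_map.mp hp
    have hki : k < i := List.mem_range.mp (List.mem_filter.mp hk).1
    have hkl : k < ph.length := by omega
    have : ph.getD k "" = (ph.take i)[k]'(by simpa [Nat.min_eq_left hi] using hki) := by
      rw [List.getD_eq_getElem _ _ hkl, List.getElem_take]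
    rw [← hgd, this]
    exact List.getElem_mem _
  · intro hp
    obtain ⟨k0, hk0⟩ := Option.isSome_iff_exists.mp ((PySem.List.index?_isSome_iff _ _).mpr hp)
    obtain ⟨hlt, heq, hfst⟩ := PySem.List.getElem_of_index?_eq_some hk0
    have hk0i : k0 < i := by simpa [Nat.min_eq_left hi] using hlt
    have hk0l : k0 < ph.length := by omega
    have hgd : ph.getD k0 "" = p := by
      rw [List.getD_eq_getElem _ _ hk0l, ← List.getElem_take (h := hlt)]
      exact heq
    have hkeep : keepB ph k0 = true := by
      simp only [keepB, dupB, Bool.not_eq_true']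
      rw [List.contains_eq_any_beq, List.any_eq]
      simp only [Bool.not_eq_true, decide_eq_false_iff_not]
      rintro ⟨q, hq, hbq⟩
      obtain ⟨jj, hjj, hjq⟩ := List.mem_iff_getElem.mp hq
      have hjlen : jj < k0 := by have := (Nat.lt_min.mp (by simpa using hjj)); exact this.1
      have : (ph.take i)[jj]'(by simpa [Nat.min_eq_left hi] using (by omega : jj < i)) = q := by
        rw [List.getElem_take] at hjq ⊢
        exact hjq
      apply hfst jj (by omega)
      rw [this]
      have := beq_iff_eq.mp hbq
      rw [hgd] at this
      exact this.symm
    refine List.mem_map.mpr ⟨k0, List.mem_filter.mpr ⟨List.mem_range.mpr hk0i, hkeep⟩, hgd⟩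

theorem take_succ_getD (ph : List String) (i : Nat) (hi : i < ph.length) :
    ph.take (i+1) = ph.take i ++ [ph.getD i ""] := by
  rw [List.take_succ]
  simp [List.getElem?_eq_getElem hi, List.getD]

-- the first occurrence of a duplicated path, with its properties
theorem firstOcc (ph : List String) (i : Nat) (hi : i ≤ ph.length) (p : String) (hp : p ∈ ph.take i) :
    ∃ k0 : Nat, PySem.List.index? (ph.take i) p = some k0 ∧ k0 < i ∧ ph.getD k0 "" = p ∧
      keepB ph k0 = true ∧ PySem.List.index? (chkS ph i) p = some (kcnt ph k0) ∧
      kcnt ph k0 < kcnt ph i := by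
  obtain ⟨k0, hk0⟩ := Option.isSome_iff_exists.mp ((PySem.List.index?_isSome_iff _ _).mpr hp)
  obtain ⟨hlt, heq, hfst⟩ := PySem.List.getElem_of_index?_eq_some hk0
  have hk0i : k0 < i := by simpa [Nat.min_eq_left hi] using hlt
  have hk0l : k0 < ph.length := by omega
  have hgd : ph.getD k0 "" = p := by
    rw [List.getD_eq_getElem _ _ hk0l, ← List.getElem_take (h := hlt)]
    exact heq
  have hfst' : ∀ j : Nat, j < k0 → ph.getD j "" ≠ p := by
    intro j hj hc
    apply hfst j hj
    have hjl : j < ph.length := by omega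
    rw [List.getElem_take, ← List.getD_eq_getElem ph "" hjl]
    exact hc
  have hkeep : keepB ph k0 = true := by
    simp only [keepB, dupB, Bool.not_eq_true']
    rw [List.contains_eq_any_beq, List.any_eq]
    simp only [decide_eq_false_iff_not]
    rintro ⟨q, hq, hbq⟩
    obtain ⟨jj, hjj, hjq⟩ := List.mem_iff_getElem.mp hq
    have hjlen : jj < k0 := (Nat.lt_min.mp (by simpa using hjj)).1
    apply hfst' jj hjlen
    have hjl : jj < ph.length := by omega
    have hje : ph.getD jj "" = q := by
      rw [List.getD_eq_getElem _ _ hjl]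
      rw [List.getElem_take] at hjq
      exact hjq
    rw [hje]
    rw [hgd] at hbq
    exact (beq_iff_eq.mp hbq).symm
  have hsplit := range_filter_split i k0 (keepB ph) hk0i
  rw [hkeep] at hsplit
  simp only [if_true] at hsplit
  have hkron : kron ph i = kron ph k0 ++ k0 :: (List.range' (k0+1) (i-k0-1)).filter (keepB ph) := by
    simpa [kron] using hsplit
  have hnotmem : p ∉ (kron ph k0).map (fun k => ph.getD k "") := by
    intro hmem
    obtain ⟨j, hj, hje⟩ := List.mem_map.mp hmem
    have hjk : j < k0 := List.mem_range.mp (List.mem_filter.mp hj).1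
    exact hfst' j hjk hje
  have hchk : chkS ph i = (kron ph k0).map (fun k => ph.getD k "")
      ++ p :: ((List.range' (k0+1) (i-k0-1)).filter (keepB ph)).map (fun k => ph.getD k "") := by
    simp only [chkS]
    rw [hkron, List.map_append, List.map_cons, hgd]
  have hidx : PySem.List.index? (chkS ph i) p = some (kcnt ph k0) := by
    rw [hchk, index?_append_mid _ _ _ hnotmem]
    simp [kcnt]
  have hcnt : kcnt ph k0 < kcnt ph i := by
    have := congrArg List.length hkron
    simp [kcnt] at *
    omega
  exact ⟨k0, hk0, hk0i, hgd, hkeep, hidx, hcnt⟩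

theorem kron_succ_keep (ph : List String) (i : Nat) (h : keepB ph i = true) :
    kron ph (i+1) = kron ph i ++ [i] := by
  simp [kron, List.range_succ, List.filter_append, h]

theorem kron_succ_dup (ph : List String) (i : Nat) (h : dupB ph i = true) :
    kron ph (i+1) = kron ph i := by
  simp [kron, List.range_succ, List.filter_append, keepB, h]

theorem dupL_succ_keep (ph : List String) (i : Nat) (h : keepB ph i = true) :
    dupL ph (i+1) = dupL ph i := by
  have hd : dupB ph i = false := by simpa [keepB] using h
  simp [dupL, List.range_succ, List.filter_append, hd]

theorem dupL_succ_dup (ph : List String) (i : Nat) (h : dupB ph i = true) :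
    dupL ph (i+1) = dupL ph i ++ [((i : Nat) : Int)] := by
  simp [dupL, List.range_succ, List.filter_append, h]

theorem set_add_dupL (ph : List String) (i : Nat) :
    PySem.Set.add (dupL ph i) ((i : Nat) : Int) = dupL ph i ++ [((i : Nat) : Int)] := by
  have hc : (dupL ph i).contains ((i : Nat) : Int) = false := by
    rw [contains_dupL]
    simp
  have : ((i : Nat) : Int) ∉ dupL ph i := by simpa using hc
  simp [PySem.Set.add, this]

-- the joint loop invariant: A's state after i iterations, and B's, in terms of the input
theorem inv_lemma (nm0 : List String) (pt0 lv0 : List Int) (ph0 lab0 : List String)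
    (hpre : Pre_repeat_add nm0 pt0 lv0 ph0 lab0) :
    ∀ i, i ≤ nm0.length →
    ((PySem.List.pyRange 0 (i : Int) 1).foldl aStep ⟨nm0, pt0, lv0, ph0, lab0, [], [], 0⟩
      = ⟨dropDup (dupL ph0 i) nm0,
         dropDup (dupL ph0 i) ((PySem.List.pyRange 0 (i : Int) 1).foldl (bStep ph0)
           ⟨PySem.Dict.empty, PySem.Set.ofList [], pt0, lv0⟩).pt,
         dropDup (dupL ph0 i) ((PySem.List.pyRange 0 (i : Int) 1).foldl (bStep ph0)
           ⟨PySem.Dict.empty, PySem.Set.ofList [], pt0, lv0⟩).lv,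
         dropDup (dupL ph0 i) ph0, dropDup (dupL ph0 i) lab0,
         chkS ph0 i, locS ph0 i, (i : Int) - (kcnt ph0 i : Int)⟩)
    ∧ ((PySem.List.pyRange 0 (i : Int) 1).foldl (bStep ph0)
         ⟨PySem.Dict.empty, PySem.Set.ofList [], pt0, lv0⟩).dups = dupL ph0 i
    ∧ ((PySem.List.pyRange 0 (i : Int) 1).foldl (bStep ph0)
         ⟨PySem.Dict.empty, PySem.Set.ofList [], pt0, lv0⟩).pt.length = pt0.length
    ∧ ((PySem.List.pyRange 0 (i : Int) 1).foldl (bStep ph0)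
         ⟨PySem.Dict.empty, PySem.Set.ofList [], pt0, lv0⟩).lv.length = lv0.length
    ∧ (∀ p, ((PySem.List.pyRange 0 (i : Int) 1).foldl (bStep ph0)
         ⟨PySem.Dict.empty, PySem.Set.ofList [], pt0, lv0⟩).first.get? p
        = (PySem.List.index? (ph0.take i) p).map (fun k => (k : Int))) := by
  intro i
  induction i with
  | zero =>
    intro _
    have h0 : PySem.List.pyRange 0 ((0 : Nat) : Int) 1 = [] := by simp [PySem.List.pyRange]
    rw [h0]
    simp only [List.foldl_nil]
    refine ⟨?_, by first | trivial | rfl, by first | trivial | rfl, by first | trivial | rfl,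
      by first | trivial | (intro p; rfl)⟩
    have hdd : ∀ {α : Type} (xs : List α), dropDup (dupL ph0 0) xs = xs := by
      intro α xs
      have : dupL ph0 0 = PySem.Set.ofList [] := by rfl
      rw [this, dropDup_nil]
    rw [hdd, hdd, hdd, hdd, hdd]
    rfl
  | succ i ih =>
    intro hn1
    obtain ⟨hA, hD, hPT, hLV, hF⟩ := ih (by omega)
    have hin : i < nm0.length := by omega
    have hiph : i < ph0.length := by have := hpre.1; omega
    have hile : i ≤ ph0.length := by omega
    have hr : PySem.List.pyRange 0 ((i + 1 : Nat) : Int) 1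
        = PySem.List.pyRange 0 ((i : Nat) : Int) 1 ++ [((i : Nat) : Int)] := by
      rw [show ((i + 1 : Nat) : Int) = ((i : Nat) : Int) + 1 by push_cast; ring]
      exact PySem.List.pyRange_one_succ_right (by positivity)
    rw [hr]
    simp only [List.foldl_append, List.foldl_cons, List.foldl_nil]
    rw [hA]
    set T := (PySem.List.pyRange 0 ((i : Nat) : Int) 1).foldl (bStep ph0)
      ⟨PySem.Dict.empty, PySem.Set.ofList [], pt0, lv0⟩ with hT
    have ho : ((i : Nat) : Int) - (((i : Nat) : Int) - ((kcnt ph0 i : Nat) : Int))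
        = ((kcnt ph0 i : Nat) : Int) := by ring
    have hcontless : ∀ k : Nat, dupB ph0 k = false →
        (dupL ph0 i).contains ((k : Nat) : Int) = false := by
      intro k hk
      rw [contains_dupL]
      simp [hk]
    have hconti : (dupL ph0 i).contains ((i : Nat) : Int) = false := by
      rw [contains_dupL]; simp
    have hpA : PySem.List.pyGetD (dropDup (dupL ph0 i) ph0) ((kcnt ph0 i : Nat) : Int) ""
        = ph0.getD i "" := by
      have h := dd_get (dupL ph0 i) ph0 "" i hiph hconti
      rw [kfilter_eq ph0 i i (Nat.le_refl i)] at h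
      exact h
    have hpB : PySem.List.pyGetD ph0 ((i : Nat) : Int) "" = ph0.getD i "" := by
      rw [PySem.List.pyGetD_natCast]
    by_cases hmem : ph0.getD i "" ∈ ph0.take i
    · -- duplicate path
      obtain ⟨k0, hk0, hk0i, hgd0, hkeep0, hidx0, hcnt0⟩ := firstOcc ph0 i hile _ hmem
      have hdupi : dupB ph0 i = true := by
        simp only [dupB]
        rw [List.contains_iff_mem]
        exact hmem
      obtain ⟨hptl, hlvl, hlabl⟩ := hpre.2 i hin hmem
      have hk0ph : k0 < ph0.length := by omega
      have hcontk0 : (dupL ph0 i).contains ((k0 : Nat) : Int) = false :=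
        hcontless k0 (by simpa [keepB] using hkeep0)
      have hmc : (chkS ph0 i).contains (ph0.getD i "") = true := by
        rw [List.contains_iff_mem]
        exact (mem_chkS ph0 i hile _).mpr hmem
      -- B side
      have hsome : T.first.get? (PySem.List.pyGetD ph0 ((i : Nat) : Int) "") = some ((k0 : Nat) : Int) := by
        rw [hpB, hF, hk0]
        rfl
      -- A step
      have hstepA : aStep ⟨dropDup (dupL ph0 i) nm0, dropDup (dupL ph0 i) T.pt,
          dropDup (dupL ph0 i) T.lv, dropDup (dupL ph0 i) ph0, dropDup (dupL ph0 i) lab0,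
          chkS ph0 i, locS ph0 i, ((i : Nat) : Int) - ((kcnt ph0 i : Nat) : Int)⟩ ((i : Nat) : Int)
          = ⟨dropDup (dupL ph0 (i+1)) nm0,
             dropDup (dupL ph0 (i+1)) (T.pt.set k0 (T.pt.getD k0 0 + T.pt.getD i 0)),
             dropDup (dupL ph0 (i+1)) (T.lv.set k0 (T.lv.getD k0 0 + T.lv.getD i 0)),
             dropDup (dupL ph0 (i+1)) ph0, dropDup (dupL ph0 (i+1)) lab0,
             chkS ph0 (i+1), locS ph0 (i+1),
             ((i : Nat) : Int) - ((kcnt ph0 i : Nat) : Int) + 1⟩ := by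
        simp only [aStep, ho, hpA, hmc, Bool.true_eq_false, if_false]
        have hchk1 : chkS ph0 (i+1) = chkS ph0 i := by simp [chkS, kron_succ_dup ph0 i hdupi]
        have hloc1 : locS ph0 (i+1) = locS ph0 i := by simp [locS, hchk1]
        rw [hchk1, hloc1, hidx0]
        simp only [Option.getD_some, locS]
        rw [getD_zipIdx_map (chkS ph0 i) (kcnt ph0 k0) (by rw [length_chkS]; exact hcnt0)]
        simp only []
        have hfk0 : ((List.range k0).filter
            (fun j => !(PySem.Set.contains (dupL ph0 i) ((j : Nat) : Int)))).length = kcnt ph0 k0 := by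
          rw [kfilter_eq ph0 i k0 (Nat.le_of_lt hk0i)]
          rfl
        have hfi : ((List.range i).filter
            (fun j => !(PySem.Set.contains (dupL ph0 i) ((j : Nat) : Int)))).length = kcnt ph0 i := by
          rw [kfilter_eq ph0 i i (Nat.le_refl i)]
          rfl
        have hTptk0 : k0 < T.pt.length := by rw [hPT]; omega
        have hTpti : i < T.pt.length := by rw [hPT]; omega
        have hTlvk0 : k0 < T.lv.length := by rw [hLV]; omega
        have hTlvi : i < T.lv.length := by rw [hLV]; omega
        have hgetk0pt : PySem.List.pyGetD (dropDup (dupL ph0 i) T.pt) ((kcnt ph0 k0 : Nat) : Int) 0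
            = T.pt.getD k0 0 := by
          have h := dd_get (dupL ph0 i) T.pt 0 k0 hTptk0 hcontk0
          rw [hfk0] at h; exact h
        have hgetipt : PySem.List.pyGetD (dropDup (dupL ph0 i) T.pt) ((kcnt ph0 i : Nat) : Int) 0
            = T.pt.getD i 0 := by
          have h := dd_get (dupL ph0 i) T.pt 0 i hTpti hconti
          rw [hfi] at h; exact h
        have hgetk0lv : PySem.List.pyGetD (dropDup (dupL ph0 i) T.lv) ((kcnt ph0 k0 : Nat) : Int) 0
            = T.lv.getD k0 0 := by
          have h := dd_get (dupL ph0 i) T.lv 0 k0 hTlvk0 hcontk0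
          rw [hfk0] at h; exact h
        have hgetilv : PySem.List.pyGetD (dropDup (dupL ph0 i) T.lv) ((kcnt ph0 i : Nat) : Int) 0
            = T.lv.getD i 0 := by
          have h := dd_get (dupL ph0 i) T.lv 0 i hTlvi hconti
          rw [hfi] at h; exact h
        rw [hgetk0pt, hgetipt, hgetk0lv, hgetilv]
        rw [PySem.List.pySetD_natCast, PySem.List.pySetD_natCast]
        have hsetpt : (dropDup (dupL ph0 i) T.pt).set (kcnt ph0 k0) (T.pt.getD k0 0 + T.pt.getD i 0)
            = dropDup (dupL ph0 i) (T.pt.set k0 (T.pt.getD k0 0 + T.pt.getD i 0)) := by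
          have h := dd_set (dupL ph0 i) T.pt (T.pt.getD k0 0 + T.pt.getD i 0) k0 hTptk0 hcontk0
          rw [hfk0] at h; exact h
        have hsetlv : (dropDup (dupL ph0 i) T.lv).set (kcnt ph0 k0) (T.lv.getD k0 0 + T.lv.getD i 0)
            = dropDup (dupL ph0 i) (T.lv.set k0 (T.lv.getD k0 0 + T.lv.getD i 0)) := by
          have h := dd_set (dupL ph0 i) T.lv (T.lv.getD k0 0 + T.lv.getD i 0) k0 hTlvk0 hcontk0
          rw [hfk0] at h; exact h
        rw [hsetpt, hsetlv]
        have hpop : ∀ {α : Type} (xs : List α), i < xs.length →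
            popA (dropDup (dupL ph0 i) xs) ((kcnt ph0 i : Nat) : Int)
              = dropDup (dupL ph0 (i+1)) xs := by
          intro α xs hx
          have h := dd_pop (dupL ph0 i) xs i hx hconti
          rw [hfi, ← dupL_succ_dup ph0 i hdupi] at h
          exact h
        rw [hpop nm0 hin, hpop ph0 hiph, hpop lab0 hlabl,
            hpop (T.pt.set k0 (T.pt.getD k0 0 + T.pt.getD i 0)) (by simpa using hTpti),
            hpop (T.lv.set k0 (T.lv.getD k0 0 + T.lv.getD i 0)) (by simpa using hTlvi)]
      have hbB : bStep ph0 T ((i : Nat) : Int)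
          = { first := T.first, dups := PySem.Set.add T.dups ((i : Nat) : Int),
              pt := PySem.List.pySetD T.pt ((k0 : Nat) : Int)
                (PySem.List.pyGetD T.pt ((k0 : Nat) : Int) 0 + PySem.List.pyGetD T.pt ((i : Nat) : Int) 0),
              lv := PySem.List.pySetD T.lv ((k0 : Nat) : Int)
                (PySem.List.pyGetD T.lv ((k0 : Nat) : Int) 0 + PySem.List.pyGetD T.lv ((i : Nat) : Int) 0) } := by
        simp only [bStep, hsome]
      have hdups1 : PySem.Set.add T.dups ((i : Nat) : Int) = dupL ph0 (i+1) := by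
        rw [hD, set_add_dupL, ← dupL_succ_dup ph0 i hdupi]
      have hptB : PySem.List.pySetD T.pt ((k0 : Nat) : Int)
            (PySem.List.pyGetD T.pt ((k0 : Nat) : Int) 0 + PySem.List.pyGetD T.pt ((i : Nat) : Int) 0)
          = T.pt.set k0 (T.pt.getD k0 0 + T.pt.getD i 0) := by
        simp
      have hlvB : PySem.List.pySetD T.lv ((k0 : Nat) : Int)
            (PySem.List.pyGetD T.lv ((k0 : Nat) : Int) 0 + PySem.List.pyGetD T.lv ((i : Nat) : Int) 0)
          = T.lv.set k0 (T.lv.getD k0 0 + T.lv.getD i 0) := by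
        simp
      refine ⟨?_, ?_, ?_, ?_, ?_⟩
      · rw [hstepA, hbB]
        simp only [hptB, hlvB]
        have hu : ((i : Nat) : Int) - ((kcnt ph0 i : Nat) : Int) + 1
            = (((i+1) : Nat) : Int) - ((kcnt ph0 (i+1) : Nat) : Int) := by
          rw [show kcnt ph0 (i+1) = kcnt ph0 i by simp [kcnt, kron_succ_dup ph0 i hdupi]]
          push_cast; ring
        rw [hu]
      · rw [hbB]
        exact hdups1
      · rw [hbB]
        simp only [hptB]
        rw [List.length_set]
        exact hPT
      · rw [hbB]
        simp only [hlvB]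
        rw [List.length_set]
        exact hLV
      · intro p'
        rw [hbB]
        show T.first.get? p' = _
        rw [hF, take_succ_getD ph0 i hiph]
        by_cases hp' : p' = ph0.getD i ""
        · subst hp'
          rw [PySem.List.index?_append_of_mem _ hmem]
        · rw [index?_append_singleton _ _ _ hp']
    · -- new path
      have hdupf : dupB ph0 i = false := by
        simp only [dupB]
        simpa using hmem
      have hkeepi : keepB ph0 i = true := by simp [keepB, hdupf]
      have hnotchk : ph0.getD i "" ∉ chkS ph0 i := fun hc => hmem ((mem_chkS ph0 i hile _).mp hc)
      have hmcf : (chkS ph0 i).contains (ph0.getD i "") = false := by simpa using hnotchk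
      have hnone : T.first.get? (PySem.List.pyGetD ph0 ((i : Nat) : Int) "") = none := by
        rw [hpB, hF, (PySem.List.index?_eq_none_iff _ _).mpr hmem]
        rfl
      have hchk2 : chkS ph0 (i+1) = chkS ph0 i ++ [ph0.getD i ""] := by
        simp [chkS, kron_succ_keep ph0 i hkeepi]
      have hloc2 : locS ph0 (i+1) = locS ph0 i ++ [(ph0.getD i "", ((kcnt ph0 i : Nat) : Int))] := by
        simp only [locS, hchk2, zipIdx_map_append, length_chkS]
      have hdupL2 : dupL ph0 (i+1) = dupL ph0 i := dupL_succ_keep ph0 i hkeepi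
      have hkcnt2 : kcnt ph0 (i+1) = kcnt ph0 i + 1 := by
        simp [kcnt, kron_succ_keep ph0 i hkeepi]
      have hu : ((i : Nat) : Int) - ((kcnt ph0 i : Nat) : Int)
          = (((i+1) : Nat) : Int) - ((kcnt ph0 (i+1) : Nat) : Int) := by
        rw [hkcnt2]; push_cast; ring
      have hbB : bStep ph0 T ((i : Nat) : Int)
          = { first := T.first.insert (ph0.getD i "") ((i : Nat) : Int),
              dups := T.dups, pt := T.pt, lv := T.lv } := by
        simp only [bStep, hnone]
        rw [hpB]
      refine ⟨?_, ?_, ?_, ?_, ?_⟩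
      · rw [hbB]
        simp only [aStep, ho, hpA, hmcf, if_true]
        rw [hchk2, hloc2, hdupL2, hu]
      · rw [hbB]
        show T.dups = _
        rw [hD, hdupL2]
      · rw [hbB]
        exact hPT
      · rw [hbB]
        exact hLV
      · intro p'
        rw [hbB]
        show (T.first.insert (ph0.getD i "") ((i : Nat) : Int)).get? p' = _
        rw [PySem.Dict.get?_insert, take_succ_getD ph0 i hiph]
        by_cases hp' : p' = ph0.getD i ""
        · subst hp'
          rw [if_pos rfl, index?_append_mid _ _ _ (by simpa using hmem)]
          rw [List.length_take, Nat.min_eq_left hile]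
          rfl
        · rw [if_neg hp', index?_append_singleton _ _ _ hp', hF]




-- ===== VERDICT (by name: the statement is the Claim_ definition above) =====
theorem repeat_add_spec : Claim_equal_repeat_add := by
  intro nmL ptL lvL phL labL hdom hpre
  unfold Spec_repeat_add
  simp only [repeat_add, repeat_add_alt]
  obtain ⟨hA, hD, -, -, -⟩ := inv_lemma nmL ptL lvL phL labL hpre nmL.length (Nat.le_refl _)
  rw [hA, hD]
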